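-- pv_equiv track=rewrite | github.com/snjumaheshwari/Program | Algo/nptel_daa_week_3.py | fun_game
-- ===== SOURCE A (Python) =====
-- def fun_game(list,k):
-- 	""" choose k item from list one max other min and so on """
-- 	list.sort()
-- 	n=0
-- 	start=0
-- 	end=len(list)-1
-- 	sum=0
-- 	while(k!=n):
-- 		if(n%2!=0):
-- 			item=list[start]
-- 			start=start+1
-- 		else :
-- 			item=list[end]
-- 			end=end-1
-- 		n=n+1
-- 		sum=sum+item
-- 	return sum
-- ===== SOURCE B (Python) =====
-- def fun_game(list, k):
--     """ choose k item from list one max other min and so on """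
--     s = sorted(list)
--     return sum(s[:k // 2]) + sum(s[len(s) - (k + 1) // 2:])
-- ===== Notes on version B (the rewrite author's own statement) =====
-- stated objective: simpler
-- what changed: Replaces the two-pointer while loop that alternately pops max/min with a closed form: sort once, then sum the bottom k//2 and top ceil(k/2) slices.
-- outside the precondition, e.g. on fun_game([1, 2], 5): A returns 8, B returns 5; on fun_game([1, 2], 7): A raises IndexError, B returns 6
import Mathlib
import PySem

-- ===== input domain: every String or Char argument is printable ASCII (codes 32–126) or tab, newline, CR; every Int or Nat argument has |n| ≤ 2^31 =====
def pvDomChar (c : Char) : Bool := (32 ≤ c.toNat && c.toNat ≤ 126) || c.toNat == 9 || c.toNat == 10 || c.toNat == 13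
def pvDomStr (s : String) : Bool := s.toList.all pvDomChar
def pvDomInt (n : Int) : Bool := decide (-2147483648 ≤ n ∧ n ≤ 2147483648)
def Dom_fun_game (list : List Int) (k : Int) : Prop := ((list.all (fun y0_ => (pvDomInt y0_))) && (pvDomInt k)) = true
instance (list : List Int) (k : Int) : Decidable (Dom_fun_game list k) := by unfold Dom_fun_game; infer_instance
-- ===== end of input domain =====

-- B replaces A's alternating two-pointer while loop by a closed form over the sorted list
-- (sum of the bottom k//2 and the top ceil(k/2) slices); same cost class, simpler code.
-- A sorts its argument in place; B does not mutate it — the equivalence proved is about the return value.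

-- ===== PORT A =====
-- the while(k!=n) loop; state (n, start, end, sum) exactly as in A.
-- If k < n Python loops forever (only reachable with k < 0, outside Pre_): we return sum there for totality.
-- pyGet? = none is Python's IndexError (outside Pre_): .getD 0 only makes the port total there.
def fun_game_loop (s : List Int) (k n start fin sum : Int) : Int :=
  if _h : k = n then sum
  else if _hlt : n < k then
    if PySem.Int.mod n 2 ≠ 0 then
      fun_game_loop s k (n + 1) (start + 1) fin (sum + (PySem.List.pyGet? s start).getD 0)
    else
      fun_game_loop s k (n + 1) start (fin - 1) (sum + (PySem.List.pyGet? s fin).getD 0)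
  else sum
termination_by (k - n).toNat
decreasing_by all_goals omega

def fun_game (list : List Int) (k : Int) : Int :=
  let s := PySem.List.sorted list (fun x => x) false   -- list.sort()
  fun_game_loop s k 0 0 (PySem.List.len s - 1) 0

-- ===== PORT B =====
def fun_game_alt (list : List Int) (k : Int) : Int :=
  let s := PySem.List.sorted list (fun x => x) false
  (PySem.List.slice s none (some (PySem.Int.floordiv k 2))).sum
    + (PySem.List.slice s (some (PySem.List.len s - PySem.Int.floordiv (k + 1) 2)) none).sum

-- ===== PRECONDITION & SPEC =====
-- Pre_ excludes k < 0, where A loops forever, and k > 2*len(list), where A's end pointer runs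
-- past the front — raising IndexError (k ≥ 2*len+2) or, at k = 2*len+1 exactly, returning an
-- accidental negative-index-wraparound value.
def Pre_fun_game (list : List Int) (k : Int) : Prop := 0 ≤ k ∧ k ≤ 2 * list.length
instance (list : List Int) (k : Int) : Decidable (Pre_fun_game list k) := by unfold Pre_fun_game; infer_instance
def pvWitness_fun_game : List Int × Int := ([3, 1, 2], 2)
def Spec_fun_game (list : List Int) (k : Int) (out : Int) : Prop := out = fun_game_alt list k
instance (list : List Int) (k : Int) (out : Int) : Decidable (Spec_fun_game list k out) := by unfold Spec_fun_game; infer_instance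

-- ===== CLAIM (what is proved, stated in full; the proofs are below) =====
def Claim_equal_fun_game : Prop := ∀ (list : List Int) (k : Int), Dom_fun_game list k → Pre_fun_game list k → Spec_fun_game list k (fun_game list k)

-- ===== LEMMAS AND PROOFS =====

-- summing one more element off the front of a segment
lemma sum_drop_take_succ (s : List Int) (a j : Nat) (h : a < s.length) :
    ((s.drop a).take (j + 1)).sum = s[a] + ((s.drop (a + 1)).take j).sum := by
  rw [← List.getElem_cons_drop h, List.take_succ_cons, List.sum_cons]

-- summing one more element off the back of a segment
lemma sum_take_succ (xs : List Int) (j : Nat) (h : j < xs.length) :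
    (xs.take (j + 1)).sum = (xs.take j).sum + xs[j] := by
  rw [List.take_add_one, List.sum_append]
  simp [List.getElem?_eq_getElem h]

-- the invariant of A's alternating two-pointer loop: starting at an even step n with m picks
-- left, it adds the m/2 elements from index a up and the (m+1)/2 elements from index b down
-- (the two segments may overlap; only the m/2 resp. (m+1)/2 indices themselves must be valid).
lemma fun_game_loop_eq (m : Nat) : ∀ (s : List Int) (a b n acc : Int),
    PySem.Int.mod n 2 = 0 → 0 ≤ a → a + ((m / 2 : Nat) : Int) ≤ (s.length : Int) →
    (((m + 1) / 2 : Nat) : Int) ≤ b + 1 → b < (s.length : Int) →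
    fun_game_loop s (n + m) n a b acc
      = acc + ((s.drop a.toNat).take (m / 2)).sum
          + ((s.drop ((b + 1).toNat - (m + 1) / 2)).take ((m + 1) / 2)).sum := by
  induction m using Nat.strong_induction_on with
  | _ m IH =>
    intro s a b n acc hn ha haf hcb' hb
    rw [PySem.Int.mod_eq_emod_of_pos (by omega)] at hn
    match m with
    | 0 =>
      rw [fun_game_loop]
      simp
    | 1 =>
      have hb0 : 0 ≤ b := by push_cast at hcb'; omega
      have hblt : b.toNat < s.length := by omega
      rw [fun_game_loop]
      rw [dif_neg (show ¬ (n + (((1:Nat)):Int) = n) by push_cast; omega)]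
      rw [dif_pos (show n < n + (((1:Nat)):Int) by push_cast; omega)]
      rw [if_neg (show ¬ (PySem.Int.mod n 2 ≠ 0) by rw [PySem.Int.mod_eq_emod_of_pos (by omega)]; omega)]
      rw [fun_game_loop]
      rw [dif_pos (show n + (((1:Nat)):Int) = n + 1 by push_cast; ring)]
      rw [PySem.List.pyGet?_eq_some_getElem s hb0 hb]
      have h1 : (1 + 1) / 2 = 1 := by omega
      have h0 : (1:Nat) / 2 = 0 := by omega
      have hbt : (b + 1).toNat - 1 = b.toNat := by omega
      rw [h1, h0, hbt]
      rw [sum_drop_take_succ s b.toNat 0 hblt]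
      simp
    | (m' + 2) =>
      have hb0 : (0:Int) ≤ b := by push_cast at hcb'; omega
      have hbt : b.toNat < s.length := by omega
      have hat : a.toNat < s.length := by push_cast at haf; omega
      rw [fun_game_loop]
      rw [dif_neg (show ¬ (n + ((((m' + 2):Nat)):Int) = n) by push_cast; omega)]
      rw [dif_pos (show n < n + ((((m' + 2):Nat)):Int) by push_cast; omega)]
      rw [if_neg (show ¬ (PySem.Int.mod n 2 ≠ 0) by rw [PySem.Int.mod_eq_emod_of_pos (by omega)]; omega)]
      rw [fun_game_loop]
      rw [dif_neg (show ¬ (n + ((((m' + 2):Nat)):Int) = n + 1) by push_cast; omega)]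
      rw [dif_pos (show n + 1 < n + ((((m' + 2):Nat)):Int) by push_cast; omega)]
      rw [if_pos (show PySem.Int.mod (n + 1) 2 ≠ 0 by rw [PySem.Int.mod_eq_emod_of_pos (by omega)]; omega)]
      have hk : n + (↑(m' + 2) : Int) = (n + 1 + 1) + (m' : Nat) := by push_cast; ring
      rw [hk]
      rw [IH m' (by omega) s (a + 1) (b - 1) (n + 1 + 1)
            _ (by rw [PySem.Int.mod_eq_emod_of_pos (by omega)]; omega)
            (by omega) (by push_cast at haf ⊢; omega) (by push_cast at hcb' ⊢; omega) (by omega)]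
      rw [PySem.List.pyGet?_eq_some_getElem s (by omega) hb,
          PySem.List.pyGet?_eq_some_getElem s ha (by omega)]
      simp only [Option.getD_some]
      -- arithmetic on the split counts
      have hdiv1 : (m' + 2) / 2 = m' / 2 + 1 := by omega
      have hdiv2 : (m' + 2 + 1) / 2 = (m' + 1) / 2 + 1 := by omega
      rw [hdiv1, hdiv2]
      have ha1 : (a + 1).toNat = a.toNat + 1 := by omega
      rw [ha1]
      rw [sum_drop_take_succ s a.toNat (m' / 2) hat]
      -- back segment: peel s[b] off the top
      set c := (m' + 1) / 2 with hc
      have hcb : c ≤ b.toNat := by push_cast at hcb'; omega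
      have hd1 : (b - 1 + 1).toNat - c = b.toNat - c := by omega
      have hd2 : (b + 1).toNat - (c + 1) = b.toNat - c := by omega
      rw [hd1, hd2]
      have hlen : c < (s.drop (b.toNat - c)).length := by
        rw [List.length_drop]; omega
      rw [sum_take_succ (s.drop (b.toNat - c)) c hlen]
      rw [List.getElem_drop]
      have hbc : b.toNat - c + c = b.toNat := by omega
      simp only [hbc]
      ring

-- ===== VERDICT (by name: the statement is the Claim_ definition above) =====
theorem fun_game_spec : Claim_equal_fun_game := by
  intro list k _hdom hpre
  obtain ⟨hk0, hkl⟩ := hpre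
  unfold Spec_fun_game fun_game fun_game_alt
  simp only [PySem.List.len_eq]
  have hlen : (PySem.List.sorted list (fun x => x) false).length = list.length :=
    PySem.List.length_sorted list (fun x => x) false
  generalize hsg : PySem.List.sorted list (fun x => x) false = s
  rw [hsg] at hlen
  have hm : k = ((k.toNat : Nat) : Int) := by omega
  rw [hm]
  set m := k.toNat with hmdef
  have hml : (m + 1) / 2 ≤ s.length := by omega
  have hmf : m / 2 ≤ s.length := by omega
  have h0 : ((m : Nat) : Int) = 0 + (m : Int) := by ring
  rw [h0]
  rw [fun_game_loop_eq m s 0 ((s.length : Int) - 1) 0 0 (by decide) (by omega)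
        (by push_cast; omega) (by push_cast; omega) (by omega)]
  have hend : (((s.length : Int) - 1) + 1).toNat = s.length := by omega
  rw [hend]
  have hfd : PySem.Int.floordiv (0 + ((m : Nat) : Int)) 2 = ((m / 2 : Nat) : Int) := by
    rw [zero_add]; exact_mod_cast PySem.Int.floordiv_natCast m 2
  have hfd2 : PySem.Int.floordiv ((0 + ((m : Nat) : Int)) + 1) 2 = (((m + 1) / 2 : Nat) : Int) := by
    rw [zero_add]
    have := PySem.Int.floordiv_natCast (m + 1) 2
    push_cast at this ⊢
    exact_mod_cast this
  rw [hfd, hfd2]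
  rw [PySem.List.slice_to_natCast]
  have hc : (m + 1) / 2 ≤ s.length := by omega
  have hcast : (s.length : Int) - (((m + 1) / 2 : Nat) : Int) = ((s.length - (m + 1) / 2 : Nat) : Int) := by
    push_cast; omega
  rw [hcast, PySem.List.slice_from_natCast]
  have ht : (0 : Int).toNat = 0 := by decide
  rw [ht, List.drop_zero]
  rw [List.take_of_length_le (l := s.drop (s.length - (m + 1) / 2)) (by rw [List.length_drop]; omega)]
  ring
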